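-- pv_equiv track=rewrite | github.com/TomiIsojarvi/MOOC-Ohjelmoinnin-perusteet-2023-Python | Osa 6/osa06-08_reseptihaku/src/reseptihaku.py | luo_reseptit
-- ===== SOURCE A (Python) =====
-- def luo_reseptit(rivit: list):
-- 	reseptit = []
-- 	resepti = []
--
-- 	for i in range(0, len(rivit)):
-- 		if rivit[i]:
-- 			resepti.append(rivit[i])
--
-- 			if i == len(rivit) - 1:
-- 				reseptit.append(resepti)
-- 			continue
-- 		else:
-- 			reseptit.append(resepti)
-- 			resepti = []
--
-- 	return reseptit
-- ===== SOURCE B (Python) =====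
-- def luo_reseptit(rivit: list):
--     # Recursive divide at the first blank line: emit the prefix as one group,
--     # then recurse on the remainder after the blank.
--     if not rivit:
--         return []
--     if "" in rivit:
--         k = rivit.index("")
--         return [rivit[:k]] + luo_reseptit(rivit[k + 1:])
--     return [rivit]
-- ===== Notes on version B (the rewrite author's own statement) =====
-- stated objective: alternative
-- what changed: Replaces A's stateful index loop (accumulator for the current group plus a last-index flush) by a recursive divide-and-conquer: find the first blank line, emit the prefix slice as one group, and recurse on the suffix after the blank.
import Mathlib
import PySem

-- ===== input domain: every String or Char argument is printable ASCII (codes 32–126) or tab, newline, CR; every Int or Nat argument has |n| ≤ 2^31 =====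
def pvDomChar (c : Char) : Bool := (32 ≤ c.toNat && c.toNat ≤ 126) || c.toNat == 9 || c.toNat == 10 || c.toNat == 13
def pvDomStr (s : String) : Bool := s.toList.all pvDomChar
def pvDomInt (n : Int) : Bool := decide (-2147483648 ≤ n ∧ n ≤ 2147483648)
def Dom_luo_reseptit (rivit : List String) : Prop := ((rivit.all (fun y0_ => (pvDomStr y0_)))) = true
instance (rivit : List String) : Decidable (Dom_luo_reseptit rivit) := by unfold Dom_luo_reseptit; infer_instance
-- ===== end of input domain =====

-- B replaces A's single index loop with accumulator state by a recursive divide at the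
-- first blank line (find-index, slice, recurse) — an alternative decomposition, same cost.

-- ===== PORT A =====
-- index loop over range(0, len(rivit)); rivit[i] is always in range, so rivit[i] is ported as pyGetD with default ""
def luo_reseptit (rivit : List String) : List (List String) :=
  ((PySem.List.pyRange 0 rivit.length 1).foldl
    (fun (st : List (List String) × List String) (i : Int) =>
      if PySem.List.pyGetD rivit i "" ≠ "" then
        if i = (rivit.length : Int) - 1 then
          (st.1 ++ [st.2 ++ [PySem.List.pyGetD rivit i ""]], st.2 ++ [PySem.List.pyGetD rivit i ""])
        else (st.1, st.2 ++ [PySem.List.pyGetD rivit i ""])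
      else (st.1 ++ [st.2], ([] : List String)))
    ([], [])).1

-- ===== PORT B =====
-- recursion at the first blank line; rivit.index("") is guarded by the membership test,
-- so its Option is defaulted with getD 0 (never taken)
def luo_reseptit_alt (rivit : List String) : List (List String) :=
  if rivit = [] then []
  else if "" ∈ rivit then
    let k := (PySem.List.index? rivit "").getD 0
    [PySem.List.slice rivit none (some (k : Int))] ++
      luo_reseptit_alt (PySem.List.slice rivit (some ((k : Int) + 1)) none)
  else [rivit]
termination_by rivit.length
decreasing_by
  rename_i _ hmem
  have hk := PySem.List.index?_isSome_iff (xs := rivit) (v := "") |>.mpr hmem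
  obtain ⟨k, hk⟩ := Option.isSome_iff_exists.mp hk
  obtain ⟨hlt, -, -⟩ := PySem.List.getElem_of_index?_eq_some hk
  have : ((k : Int) + 1) = (((k + 1 : Nat)) : Int) := by push_cast; ring
  simp only [hk, Option.getD_some, this, PySem.List.slice_from_natCast, List.length_drop]
  omega

-- ===== PRECONDITION & SPEC =====
def Spec_luo_reseptit (rivit : List String) (out : List (List String)) : Prop := out = luo_reseptit_alt rivit
instance (rivit : List String) (out : List (List String)) : Decidable (Spec_luo_reseptit rivit out) := by unfold Spec_luo_reseptit; infer_instance

-- ===== CLAIM (what is proved, stated in full; the proofs are below) =====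
def Claim_equal_luo_reseptit : Prop := ∀ (rivit : List String), Dom_luo_reseptit rivit → Spec_luo_reseptit rivit (luo_reseptit rivit)

-- ===== LEMMAS AND PROOFS =====

-- recursive characterisation of A's loop state (acc = groups emitted, grp = current group)
def pvGo (xs : List String) (acc : List (List String)) (grp : List String) : List (List String) :=
  match xs with
  | [] => if grp ≠ [] then acc ++ [grp] else acc
  | x :: t => if x ≠ "" then pvGo t acc (grp ++ [x]) else pvGo t (acc ++ [grp]) []

theorem pvGo_A (rivit : List String) : ∀ (t : List String) (a : ℕ), rivit.drop a = t →
    ∀ (acc : List (List String)) (grp : List String),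
    ((PySem.List.pyRange (a : Int) rivit.length 1).foldl
      (fun (st : List (List String) × List String) (i : Int) =>
        if PySem.List.pyGetD rivit i "" ≠ "" then
          if i = (rivit.length : Int) - 1 then
            (st.1 ++ [st.2 ++ [PySem.List.pyGetD rivit i ""]], st.2 ++ [PySem.List.pyGetD rivit i ""])
          else (st.1, st.2 ++ [PySem.List.pyGetD rivit i ""])
        else (st.1 ++ [st.2], ([] : List String)))
      (acc, grp)).1
    = if rivit.length ≤ a then acc else pvGo t acc grp := by
  intro t
  induction t with
  | nil =>
    intro a hd acc grp
    have ha : rivit.length ≤ a := by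
      have := congrArg List.length hd; simp at this; omega
    rw [PySem.List.pyRange_one_eq_nil (by exact_mod_cast ha)]
    simp [ha]
  | cons x t' ih =>
    intro a hd acc grp
    have ha : a < rivit.length := by
      have := congrArg List.length hd; simp at this; omega
    have hcons := List.drop_eq_getElem_cons (l := rivit) ha
    rw [hd] at hcons
    obtain ⟨hx, ht'⟩ := List.cons_eq_cons.mp hcons
    have hget : PySem.List.pyGetD rivit (a : Int) "" = x := by
      rw [PySem.List.pyGetD_natCast]; simp [List.getD, ha, hx]
    have hcast : ((a : Int) + 1) = ((a + 1 : ℕ) : Int) := by push_cast; ring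
    rw [PySem.List.pyRange_one_cons (by exact_mod_cast ha), List.foldl_cons]
    by_cases hxe : x = ""
    · subst hxe
      simp only [hget]
      rw [if_neg (by simp)]
      rw [hcast, ih (a + 1) ht'.symm (acc ++ [grp]) []]
      rw [if_neg (by omega : ¬ rivit.length ≤ a)]
      by_cases hend : rivit.length ≤ a + 1
      · have ht0 : t' = [] := by rw [ht']; exact List.drop_eq_nil_of_le (by omega)
        simp [hend, ht0, pvGo]
      · simp [hend, pvGo]
    · simp only [hget]
      rw [if_pos (by simpa using hxe)]
      by_cases hend : (a : Int) = (rivit.length : Int) - 1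
      · rw [if_pos hend]
        have hlen : rivit.length = a + 1 := by omega
        have ht0 : t' = [] := by rw [ht']; exact List.drop_eq_nil_of_le (by omega)
        rw [PySem.List.pyRange_one_eq_nil (by omega)]
        rw [if_neg (by omega : ¬ rivit.length ≤ a)]
        simp [pvGo, ht0, hxe]
      · rw [if_neg hend, hcast, ih (a + 1) ht'.symm acc (grp ++ [x])]
        rw [if_neg (by omega : ¬ rivit.length ≤ a + 1)]
        rw [if_neg (by omega : ¬ rivit.length ≤ a)]
        simp [pvGo, hxe]

-- recursive characterisation of B with an explicit pending group grp
def pvR (grp : List String) (xs : List String) : List (List String) :=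
  if hm : "" ∈ xs then
    let k := (PySem.List.index? xs "").getD 0
    (grp ++ xs.take k) :: pvR [] (xs.drop (k + 1))
  else if grp ++ xs = [] then [] else [grp ++ xs]
termination_by xs.length
decreasing_by
  have hk := PySem.List.index?_isSome_iff (xs := xs) (v := "") |>.mpr hm
  obtain ⟨k, hk⟩ := Option.isSome_iff_exists.mp hk
  obtain ⟨hlt, -, -⟩ := PySem.List.getElem_of_index?_eq_some hk
  simp only [hk, Option.getD_some, List.length_drop]
  omega

theorem pvR_pos (grp xs : List String) (hm : "" ∈ xs) :
    pvR grp xs = (grp ++ xs.take ((PySem.List.index? xs "").getD 0)) ::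
      pvR [] (xs.drop ((PySem.List.index? xs "").getD 0 + 1)) := by
  rw [pvR, dif_pos hm]

theorem pvR_neg (grp xs : List String) (hm : "" ∉ xs) :
    pvR grp xs = if grp ++ xs = [] then [] else [grp ++ xs] := by
  rw [pvR, dif_neg hm]

theorem pvGo_pvR (xs : List String) : ∀ (acc : List (List String)) (grp : List String),
    pvGo xs acc grp = acc ++ pvR grp xs := by
  induction xs with
  | nil =>
    intro acc grp
    rw [pvR_neg _ _ (by simp)]
    by_cases hg : grp = [] <;> simp [pvGo, hg]
  | cons x t ih =>
    intro acc grp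
    by_cases hx : x = ""
    · subst hx
      rw [pvR_pos _ _ (by simp)]
      simp only [PySem.List.index?_cons_self, Option.getD_some, List.take_zero,
        List.append_nil, List.drop_succ_cons, List.drop_zero, Nat.zero_add]
      simp [pvGo, ih]
    · have hidx := PySem.List.index?_cons_of_ne (x := x) (v := "") t hx
      have hmx : ("" ∈ x :: t) ↔ ("" ∈ t) := by
        constructor
        · intro h
          rcases List.mem_cons.mp h with h | h
          · exact absurd h.symm hx
          · exact h
        · exact fun h => List.mem_cons_of_mem _ h
      rw [show pvGo (x :: t) acc grp = pvGo t acc (grp ++ [x]) by simp [pvGo, hx]]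
      rw [ih]
      by_cases hm : "" ∈ t
      · obtain ⟨k, hk⟩ := Option.isSome_iff_exists.mp
          (PySem.List.index?_isSome_iff (xs := t) (v := "") |>.mpr hm)
        rw [pvR_pos _ _ hm, pvR_pos _ _ (hmx.mpr hm)]
        simp only [hidx, hk, Option.map_some, Option.getD_some]
        simp
      · rw [pvR_neg _ _ hm, pvR_neg _ _ (fun h => hm (hmx.mp h))]
        by_cases ht : t = [] <;> simp [ht]

theorem alt_eq_pvR : ∀ (n : ℕ) (xs : List String), xs.length ≤ n → luo_reseptit_alt xs = pvR [] xs := by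
  intro n
  induction n with
  | zero =>
    intro xs hx
    have h0 : xs = [] := List.eq_nil_of_length_eq_zero (by omega)
    subst h0
    rw [luo_reseptit_alt, pvR_neg _ _ (by simp)]
    simp
  | succ n ih =>
    intro xs hx
    rw [luo_reseptit_alt]
    by_cases h0 : xs = []
    · subst h0; rw [pvR_neg _ _ (by simp)]; simp
    · rw [if_neg h0]
      by_cases hm : "" ∈ xs
      · rw [if_pos hm, pvR_pos _ _ hm]
        obtain ⟨k, hk⟩ := Option.isSome_iff_exists.mp
          (PySem.List.index?_isSome_iff (xs := xs) (v := "") |>.mpr hm)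
        obtain ⟨hlt, -, -⟩ := PySem.List.getElem_of_index?_eq_some hk
        have hc1 : ((k : Int) + 1) = (((k + 1 : Nat)) : Int) := by push_cast; ring
        simp only [hk, Option.getD_some, hc1, PySem.List.slice_from_natCast,
          PySem.List.slice_to_natCast]
        rw [ih (xs.drop (k + 1)) (by simp only [List.length_drop]; omega)]
        simp
      · rw [if_neg hm, pvR_neg _ _ hm]
        simp [h0]

-- ===== VERDICT (by name: the statement is the Claim_ definition above) =====
theorem luo_reseptit_spec : Claim_equal_luo_reseptit := by
  intro rivit _
  unfold Spec_luo_reseptit luo_reseptit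
  have hA := pvGo_A rivit rivit 0 (by simp) [] []
  rw [(by norm_num : ((0 : ℕ) : Int) = 0)] at hA
  rw [hA, alt_eq_pvR rivit.length rivit le_rfl]
  by_cases h : rivit.length ≤ 0
  · have h0 : rivit = [] := List.eq_nil_of_length_eq_zero (by omega)
    subst h0; rw [pvR]; simp
  · rw [if_neg h, pvGo_pvR]; simp
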